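-- pv_equiv track=rewrite | github.com/cgvvxx/PS | ps/정렬/098_P_파일명정렬.py | get_head_num
-- ===== SOURCE A (Python) =====
-- def get_head_num(file):
--
--     num = ''
--     is_num = False
--     num_idx = 0
--
--     for idx, char in enumerate(file):
--         if char.isdigit():
--             if not is_num:
--                 num_idx = idx
--             num += char
--             is_num = True
--         else:
--             if is_num:
--                 break
--
--     return file[:num_idx].lower(), int(num)
-- ===== SOURCE B (Python) =====
-- def get_head_num(file):
--     i = 0
--     while i < len(file) and not file[i].isdigit():
--         i += 1
--     j = i
--     while j < len(file) and file[j].isdigit():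
--         j += 1
--     return file[:i].lower(), int(file[i:j])
-- ===== Notes on version B (the rewrite author's own statement) =====
-- stated objective: simpler
-- what changed: Replaces the enumerate loop with an is_num flag, break, accumulated digit string and remembered start index by two plain index scans (skip non-digits, then skip digits) and two slices.
import Mathlib
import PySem

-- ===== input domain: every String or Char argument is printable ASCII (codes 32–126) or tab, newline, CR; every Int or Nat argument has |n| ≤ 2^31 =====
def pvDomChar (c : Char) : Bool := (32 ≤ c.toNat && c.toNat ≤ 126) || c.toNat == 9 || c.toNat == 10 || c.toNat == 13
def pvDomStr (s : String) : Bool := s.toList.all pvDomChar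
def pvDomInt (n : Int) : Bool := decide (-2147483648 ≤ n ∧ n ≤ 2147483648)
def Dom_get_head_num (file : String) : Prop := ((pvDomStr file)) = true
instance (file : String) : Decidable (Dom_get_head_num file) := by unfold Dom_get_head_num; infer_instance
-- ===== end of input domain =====

-- B replaces A's flag/break/accumulator loop by two independent index scans; return value only, no mutation.

-- ===== PORT A =====
-- the for-loop over enumerate(file) with state (num, is_num, num_idx); returning the state pair is the 'break'
def pvLoopA : List (Int × Char) → List Char → Bool → Int → List Char × Int
  | [], num, _, numIdx => (num, numIdx)
  | (idx, c) :: rest, num, isNum, numIdx =>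
    if PySem.Chars.isdigit c then
      pvLoopA rest (num ++ [c]) true (if isNum then numIdx else idx)
    else
      if isNum then (num, numIdx) else pvLoopA rest num isNum numIdx

def get_head_num (file : String) : String × Int :=
  let st := pvLoopA (PySem.List.enumerate file.toList 0) [] false 0
  -- int('') raises ValueError in Python: that input (no digit in file) is excluded by Pre_; getD 0 is unreachable there
  (String.ofList (PySem.Chars.lower (PySem.List.slice file.toList none (some st.2))),
   (PySem.Int.ofChars? st.1).getD 0)

-- ===== PORT B =====
-- while i < len(file) and p(file[i]): i += 1   (index scan; i starts in range, indices are Nat since they never go negative)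
def pvScanIdx (cs : List Char) (p : Char → Bool) (i : Nat) : Nat :=
  if h : i < cs.length then
    if p cs[i] then pvScanIdx cs p (i + 1) else i
  else i
termination_by cs.length - i

def get_head_num_alt (file : String) : String × Int :=
  let cs := file.toList
  let i := pvScanIdx cs (fun c => !PySem.Chars.isdigit c) 0
  let j := pvScanIdx cs PySem.Chars.isdigit i
  -- int('') raises ValueError in Python: excluded by Pre_; getD 0 is unreachable there
  (String.ofList (PySem.Chars.lower (cs.take i)),
   (PySem.Int.ofChars? ((cs.drop i).take (j - i))).getD 0)

-- ===== PRECONDITION & SPEC =====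
-- Pre_ excludes exactly the files with no digit, where both Pythons raise ValueError from int('')
def Pre_get_head_num (file : String) : Prop := file.toList.any PySem.Chars.isdigit = true
instance (file : String) : Decidable (Pre_get_head_num file) := by unfold Pre_get_head_num; infer_instance
def pvWitness_get_head_num : String := "Dr3am.png"

def Spec_get_head_num (file : String) (out : String × Int) : Prop := out = get_head_num_alt file
instance (file : String) (out : String × Int) : Decidable (Spec_get_head_num file out) := by unfold Spec_get_head_num; infer_instance

-- ===== CLAIM (what is proved, stated in full; the proofs are below) =====
def Claim_equal_get_head_num : Prop := ∀ (file : String), Dom_get_head_num file → Pre_get_head_num file → Spec_get_head_num file (get_head_num file)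

-- ===== LEMMAS AND PROOFS =====

-- phase 2 of A's loop: once is_num is set, append digits until the first non-digit, then stop
lemma pvLoopA_true (cs : List Char) : ∀ (k : Int) (num : List Char) (ni : Int),
    pvLoopA (PySem.List.enumerate cs k) num true ni = (num ++ cs.takeWhile PySem.Chars.isdigit, ni) := by
  induction cs with
  | nil => intro k num ni; simp [PySem.List.enumerate_nil, pvLoopA]
  | cons c rest ih =>
    intro k num ni
    by_cases h : PySem.Chars.isdigit c = true
    · simp [PySem.List.enumerate_cons, pvLoopA, h, ih]
    · simp [PySem.List.enumerate_cons, pvLoopA, h]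

-- phase 1: while no digit has been seen, the state is unchanged; at the first digit the index is recorded
lemma pvLoopA_false (cs : List Char) (hany : cs.any PySem.Chars.isdigit = true) : ∀ (k : Int),
    pvLoopA (PySem.List.enumerate cs k) [] false 0 =
      ((cs.dropWhile (fun c => !PySem.Chars.isdigit c)).takeWhile PySem.Chars.isdigit,
       k + ((cs.takeWhile (fun c => !PySem.Chars.isdigit c)).length : Int)) := by
  induction cs with
  | nil => simp at hany
  | cons c rest ih =>
    intro k
    by_cases h : PySem.Chars.isdigit c = true
    · simp [PySem.List.enumerate_cons, pvLoopA, h, pvLoopA_true]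
    · have hany' : rest.any PySem.Chars.isdigit = true := by
        simpa [h] using hany
      simp only [PySem.List.enumerate_cons, pvLoopA, h, Bool.false_eq_true, ite_false]
      rw [ih hany' (k + 1)]
      simp [h]
      ring

-- the index scan is takeWhile's length, offset by the start index
lemma pvScanIdx_eq (cs : List Char) (p : Char → Bool) : ∀ (i : Nat),
    pvScanIdx cs p i = i + ((cs.drop i).takeWhile p).length := by
  intro i
  induction hn : cs.length - i using Nat.strong_induction_on generalizing i with
  | _ n ih =>
    rw [pvScanIdx]
    by_cases h : i < cs.length
    · rw [List.drop_eq_getElem_cons h, List.takeWhile_cons]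
      by_cases hp : p cs[i] = true
      · simp only [h, dif_pos, hp, if_pos]
        rw [ih (cs.length - (i+1)) (by omega) (i+1) rfl]
        simp; omega
      · simp [h, hp]
    · simp [h, List.drop_eq_nil_of_le (by omega : cs.length ≤ i)]

lemma pvDropWhile_eq_drop (p : Char → Bool) (cs : List Char) :
    cs.dropWhile p = cs.drop (cs.takeWhile p).length := by
  induction cs with
  | nil => rfl
  | cons c rest ih => by_cases h : p c = true <;> simp [h, ih]

lemma pvTakeWhile_eq_take (p : Char → Bool) (cs : List Char) :
    cs.takeWhile p = cs.take (cs.takeWhile p).length := by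
  induction cs with
  | nil => rfl
  | cons c rest ih => by_cases h : p c = true <;> simp [h, ← ih]

-- ===== VERDICT (by name: the statement is the Claim_ definition above) =====
theorem get_head_num_spec : Claim_equal_get_head_num := by
  intro file _ hpre
  unfold Spec_get_head_num get_head_num get_head_num_alt
  dsimp only
  rw [pvLoopA_false file.toList hpre 0, pvScanIdx_eq, pvScanIdx_eq]
  simp only [List.drop_zero, Nat.zero_add, Int.zero_add, Nat.add_sub_cancel_left]
  refine Prod.ext ?_ ?_
  · simp only
    rw [PySem.List.slice_to _ (by positivity)]
    simp
  · simp only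
    rw [← pvTakeWhile_eq_take, ← pvDropWhile_eq_drop]
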